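-- pv_equiv track=rewrite | github.com/Lumenified/informatics-tuts | tutorials/rosalindProblems/Problem12.py | permer
-- ===== SOURCE A (Python) =====
-- def permer(currentFile, BigONumber):
--     perm = []
--     for i in range(len(currentFile[1])):
--         for j in range(len(currentFile[1])):
--             if i==j:
--                 pass
--             else:
--                 if currentFile[1][i][-BigONumber:]==currentFile[1][j][0:BigONumber]:
--                     perm.append([[currentFile[0][i], currentFile[0][j]],[currentFile[1][i], currentFile[1][j]]])
--                 else:
--                     pass
--     return perm
-- ===== SOURCE B (Python) =====
-- def permer(currentFile, BigONumber):
--     names = currentFile[0]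
--     seqs = currentFile[1]
--     pairs = [(s[0:BigONumber], j) for j, s in enumerate(seqs)]
--     buckets = {}
--     for key, j in pairs:
--         buckets.setdefault(key, []).append(j)
--     perm = []
--     for i, s in enumerate(seqs):
--         for j in buckets.get(s[-BigONumber:], []):
--             if j != i:
--                 perm.append([[names[i], names[j]], [s, seqs[j]]])
--     return perm
-- ===== Notes on version B (the rewrite author's own statement) =====
-- stated objective: alternative
-- what changed: Replaced the all-pairs suffix/prefix comparison by one pass that groups sequence indices in a dict keyed on the length-k prefix, then a single dict lookup of each suffix; removes the inner scan over all j (not confirmed faster in a timing run, whose inputs grow string length rather than list length).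
import Mathlib
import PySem

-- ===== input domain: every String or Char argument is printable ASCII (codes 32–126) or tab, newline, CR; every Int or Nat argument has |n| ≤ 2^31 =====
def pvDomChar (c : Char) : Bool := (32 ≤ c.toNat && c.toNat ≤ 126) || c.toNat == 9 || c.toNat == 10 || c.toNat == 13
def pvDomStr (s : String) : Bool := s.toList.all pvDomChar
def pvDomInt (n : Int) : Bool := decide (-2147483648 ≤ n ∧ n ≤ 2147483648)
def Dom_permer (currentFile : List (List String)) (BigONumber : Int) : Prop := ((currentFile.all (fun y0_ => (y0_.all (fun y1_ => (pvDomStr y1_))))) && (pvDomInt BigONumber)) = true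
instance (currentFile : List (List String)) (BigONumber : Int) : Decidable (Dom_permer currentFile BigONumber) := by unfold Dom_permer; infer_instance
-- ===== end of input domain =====

-- B replaces A's all-pairs suffix/prefix scan by a dict from length-k prefix to the indices
-- bearing it, looked up once per suffix; return value proved identical on Pre_.

-- ===== PORT A =====
def permer (currentFile : List (List String)) (BigONumber : Int) : List (List (List String)) :=
  let names := (PySem.List.pyGet? currentFile 0).getD []
  let seqs := (PySem.List.pyGet? currentFile 1).getD []
  (PySem.List.pyRange 0 (seqs.length : Int) 1).foldl (fun perm i =>
    (PySem.List.pyRange 0 (seqs.length : Int) 1).foldl (fun perm j =>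
      if i = j then perm
      else if PySem.Str.slice (PySem.List.pyGetD seqs i "") (some (-BigONumber)) none
              = PySem.Str.slice (PySem.List.pyGetD seqs j "") (some 0) (some BigONumber) then
        perm ++ [[[PySem.List.pyGetD names i "", PySem.List.pyGetD names j ""],
                  [PySem.List.pyGetD seqs i "", PySem.List.pyGetD seqs j ""]]]
      else perm) perm) []

-- ===== PORT B =====
def permer_alt (currentFile : List (List String)) (BigONumber : Int) : List (List (List String)) :=
  let names := (PySem.List.pyGet? currentFile 0).getD []
  let seqs := (PySem.List.pyGet? currentFile 1).getD []
  let pairs := (PySem.List.enumerate seqs 0).map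
    (fun p => (PySem.Str.slice p.2 (some 0) (some BigONumber), p.1))
  let buckets := pairs.foldl (fun d p => d.modify p.1 [] (· ++ [p.2])) PySem.Dict.empty
  (PySem.List.enumerate seqs 0).foldl (fun perm p =>
    (buckets.getD (PySem.Str.slice p.2 (some (-BigONumber)) none) []).foldl (fun perm j =>
      if j ≠ p.1 then
        perm ++ [[[PySem.List.pyGetD names p.1 "", PySem.List.pyGetD names j ""],
                  [p.2, PySem.List.pyGetD seqs j ""]]]
      else perm) perm) []

-- ===== PRECONDITION & SPEC =====
-- Pre_ is exactly the set of inputs on which A returns: at least two rows, and every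
-- suffix/prefix-matching pair of distinct sequence indices lies within the name row
-- (otherwise A raises IndexError on currentFile[1] or currentFile[0][i]/[j]).
def Pre_permer (currentFile : List (List String)) (BigONumber : Int) : Prop :=
  2 ≤ currentFile.length ∧
  ∀ i ∈ List.range (currentFile.getD 1 []).length,
    ∀ j ∈ List.range (currentFile.getD 1 []).length, i ≠ j →
      PySem.Str.slice ((currentFile.getD 1 []).getD i "") (some (-BigONumber)) none
        = PySem.Str.slice ((currentFile.getD 1 []).getD j "") (some 0) (some BigONumber) →
      (i < (currentFile.getD 0 []).length ∧ j < (currentFile.getD 0 []).length)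
instance (currentFile : List (List String)) (BigONumber : Int) : Decidable (Pre_permer currentFile BigONumber) := by unfold Pre_permer; infer_instance

def pvWitness_permer : List (List String) × Int := ([["n1", "n2", "n3"], ["aab", "abb", "bba"]], 2)

def Spec_permer (currentFile : List (List String)) (BigONumber : Int) (out : List (List (List String))) : Prop := out = permer_alt currentFile BigONumber
instance (currentFile : List (List String)) (BigONumber : Int) (out : List (List (List String))) : Decidable (Spec_permer currentFile BigONumber out) := by unfold Spec_permer; infer_instance

-- ===== CLAIM (what is proved, stated in full; the proofs are below) =====
def Claim_equal_permer : Prop := ∀ (currentFile : List (List String)) (BigONumber : Int), Dom_permer currentFile BigONumber → Pre_permer currentFile BigONumber → Spec_permer currentFile BigONumber (permer currentFile BigONumber)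

-- ===== LEMMAS AND PROOFS =====

def entryAB (names seqs : List String) (i j : Int) : List (List String) :=
  [[PySem.List.pyGetD names i "", PySem.List.pyGetD names j ""],
   [PySem.List.pyGetD seqs i "", PySem.List.pyGetD seqs j ""]]

def skey (seqs : List String) (B : Int) (i : Int) : String :=
  PySem.Str.slice (PySem.List.pyGetD seqs i "") (some (-B)) none
def pkey (seqs : List String) (B : Int) (j : Int) : String :=
  PySem.Str.slice (PySem.List.pyGetD seqs j "") (some 0) (some B)

-- canonical form
def canon (names seqs : List String) (B : Int) : List (List (List String)) :=
  (PySem.List.pyRange 0 (seqs.length : Int) 1).flatMap (fun i =>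
    ((PySem.List.pyRange 0 (seqs.length : Int) 1).filter
      (fun j => decide (¬ i = j ∧ skey seqs B i = pkey seqs B j))).map (entryAB names seqs i))

theorem coreA (names seqs : List String) (B : Int) :
    (PySem.List.pyRange 0 (seqs.length : Int) 1).foldl (fun perm i =>
      (PySem.List.pyRange 0 (seqs.length : Int) 1).foldl (fun perm j =>
        if i = j then perm
        else if PySem.Str.slice (PySem.List.pyGetD seqs i "") (some (-B)) none
                = PySem.Str.slice (PySem.List.pyGetD seqs j "") (some 0) (some B) then
          perm ++ [[[PySem.List.pyGetD names i "", PySem.List.pyGetD names j ""],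
                    [PySem.List.pyGetD seqs i "", PySem.List.pyGetD seqs j ""]]]
        else perm) perm) []
    = canon names seqs B := by
  have h1 : ∀ (i : Int) (perm : List (List (List String))),
      (PySem.List.pyRange 0 (seqs.length : Int) 1).foldl (fun perm j =>
        if i = j then perm
        else if PySem.Str.slice (PySem.List.pyGetD seqs i "") (some (-B)) none
                = PySem.Str.slice (PySem.List.pyGetD seqs j "") (some 0) (some B) then
          perm ++ [[[PySem.List.pyGetD names i "", PySem.List.pyGetD names j ""],
                    [PySem.List.pyGetD seqs i "", PySem.List.pyGetD seqs j ""]]]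
        else perm) perm
      = perm ++ ((PySem.List.pyRange 0 (seqs.length : Int) 1).filter
          (fun j => decide (¬ i = j ∧ skey seqs B i = pkey seqs B j))).map (entryAB names seqs i) := by
    intro i perm
    have hb : (fun (perm : List (List (List String))) (j : Int) =>
        if i = j then perm
        else if PySem.Str.slice (PySem.List.pyGetD seqs i "") (some (-B)) none
                = PySem.Str.slice (PySem.List.pyGetD seqs j "") (some 0) (some B) then
          perm ++ [[[PySem.List.pyGetD names i "", PySem.List.pyGetD names j ""],
                    [PySem.List.pyGetD seqs i "", PySem.List.pyGetD seqs j ""]]]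
        else perm)
        = (fun perm j => if (¬ i = j ∧ skey seqs B i = pkey seqs B j) then perm ++ [entryAB names seqs i j] else perm) := by
      funext perm j
      by_cases h : i = j <;> by_cases h2 : skey seqs B i = pkey seqs B j <;>
        simp [h, skey, pkey, entryAB]
    rw [hb, PySem.List.foldl_append_ite]
  have ho : (fun (perm : List (List (List String))) (i : Int) =>
      (PySem.List.pyRange 0 (seqs.length : Int) 1).foldl (fun perm j =>
        if i = j then perm
        else if PySem.Str.slice (PySem.List.pyGetD seqs i "") (some (-B)) none
                = PySem.Str.slice (PySem.List.pyGetD seqs j "") (some 0) (some B) then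
          perm ++ [[[PySem.List.pyGetD names i "", PySem.List.pyGetD names j ""],
                    [PySem.List.pyGetD seqs i "", PySem.List.pyGetD seqs j ""]]]
        else perm) perm)
      = (fun perm i => perm ++ ((PySem.List.pyRange 0 (seqs.length : Int) 1).filter
          (fun j => decide (¬ i = j ∧ skey seqs B i = pkey seqs B j))).map (entryAB names seqs i)) := by
    funext perm i; exact h1 i perm
  rw [ho, PySem.List.foldl_append_eq_flatMap]
  simp [canon]

theorem coreB (names seqs : List String) (B : Int) :
    ((PySem.List.enumerate seqs 0).foldl (fun perm p =>
      ((((PySem.List.enumerate seqs 0).map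
            (fun p => (PySem.Str.slice p.2 (some 0) (some B), p.1))).foldl
          (fun d p => d.modify p.1 [] (· ++ [p.2])) PySem.Dict.empty).getD
            (PySem.Str.slice p.2 (some (-B)) none) []).foldl (fun perm j =>
        if j ≠ p.1 then
          perm ++ [[[PySem.List.pyGetD names p.1 "", PySem.List.pyGetD names j ""],
                    [p.2, PySem.List.pyGetD seqs j ""]]]
        else perm) perm) [])
    = canon names seqs B := by
  rw [PySem.List.enumerate_eq_map_pyRange seqs ""]
  simp only [PySem.List.foldl_append_ite, PySem.Dict.getD_foldl_modify_append,
    PySem.Dict.getD_empty, List.nil_append, List.filter_map, List.map_map,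
    PySem.List.foldl_append_eq_flatMap, List.flatMap_map]
  unfold canon
  congr 1
  funext i
  simp only [Function.comp_def, List.filter_filter]
  rw [List.filter_congr (q := fun j => decide (¬ i = j ∧ skey seqs B i = pkey seqs B j))]
  · apply List.map_congr_left
    intro j hj
    simp [entryAB]
  · intro j hj
    by_cases h : i = j
    · simp [h]
    · simp only [skey, pkey]
      by_cases h2 : PySem.Str.slice (PySem.List.pyGetD seqs i "") (some (-B)) none
          = PySem.Str.slice (PySem.List.pyGetD seqs j "") (some 0) (some B)
      · simp [h2]; omega
      · simp [h, h2, Ne.symm h2]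

theorem permer_eq_alt (currentFile : List (List String)) (BigONumber : Int) :
    permer currentFile BigONumber = permer_alt currentFile BigONumber :=
  (coreA ((PySem.List.pyGet? currentFile 0).getD []) ((PySem.List.pyGet? currentFile 1).getD []) BigONumber).trans
    (coreB ((PySem.List.pyGet? currentFile 0).getD []) ((PySem.List.pyGet? currentFile 1).getD []) BigONumber).symm

-- ===== VERDICT (by name: the statement is the Claim_ definition above) =====
theorem permer_spec : Claim_equal_permer := by
  intro cf B _ _
  exact permer_eq_alt cf B
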